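-- pv_equiv track=rewrite | github.com/CounterTorque/AdventOfCode2023 | Day13/day13_solver.py | find_center_h
-- ===== SOURCE A (Python) =====
-- def find_center_h(rows):
--      #walk each row pair and check for equality
--      for i in range(len(rows) - 1):
--          if rows[i] == rows[i+1]:
--              # once you find an equality, you need to walk back out from the "center" in both directions checking for equality
--              above = i - 1
--              below = i + 2
--              while above >= 0 and below < len(rows) and rows[above] == rows[below]:
--                  above -= 1
--                  below += 1
--
--              # if you run out of rows in either direction, you're done
--              if above < 0 or below >= len(rows):
--                  return i
--           #if they are ever not equal, you hop back to your first walk and keep going to the end of the rows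
--
--
--      return -1
-- ===== SOURCE B (Python) =====
-- def find_center_h(rows):
--     # A split below index i reaches a grid boundary iff the reversed prefix
--     # rows[:i+1][::-1] and the suffix rows[i+1:] agree on their overlap,
--     # i.e. one is a prefix of the other: decided by one slice equality
--     # (after a cheap reject of splits whose neighbouring rows differ).
--     n = len(rows)
--     for i in range(n - 1):
--         if rows[i] != rows[i + 1]:
--             continue
--         left = rows[:i + 1][::-1]
--         right = rows[i + 1:]
--         m = min(len(left), len(right))
--         if left[:m] == right[:m]:
--             return i
--     return -1
-- ===== Notes on version B (the rewrite author's own statement) =====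
-- stated objective: alternative
-- what changed: B replaces A's adjacent-pair test plus two-pointer expansion walk by a slice-level characterization: the split at i reaches a boundary iff the reversed prefix rows[:i+1][::-1] and the suffix rows[i+1:] are equal on their overlap, decided by one list-slice equality.
import Mathlib
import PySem

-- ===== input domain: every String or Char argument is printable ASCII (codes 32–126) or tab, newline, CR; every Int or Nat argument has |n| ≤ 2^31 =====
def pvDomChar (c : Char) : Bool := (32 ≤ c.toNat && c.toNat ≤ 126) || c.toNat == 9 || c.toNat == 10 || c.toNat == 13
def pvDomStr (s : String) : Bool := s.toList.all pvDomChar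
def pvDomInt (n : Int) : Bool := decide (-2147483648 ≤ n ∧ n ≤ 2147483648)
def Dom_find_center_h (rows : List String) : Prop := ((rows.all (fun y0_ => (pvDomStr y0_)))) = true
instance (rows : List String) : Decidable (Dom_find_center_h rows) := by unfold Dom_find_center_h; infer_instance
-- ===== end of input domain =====

-- B replaces A's adjacent-pair test plus two-pointer expansion walk by a slice-level test:
-- the split at i reaches a boundary iff the reversed prefix equals the suffix on their overlap.

-- ===== PORT A =====
-- the inner 'while above >= 0 and below < len(rows) and rows[above] == rows[below]'
def pvWhileA (rows : List String) (above below : Int) : Int × Int :=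
  if h : 0 ≤ above ∧ below < (rows.length : Int) ∧
      PySem.List.pyGet? rows above = PySem.List.pyGet? rows below then
    pvWhileA rows (above - 1) (below + 1)
  else (above, below)
termination_by ((rows.length : Int) - below).toNat
decreasing_by omega

-- the outer 'for i in range(len(rows) - 1)'
def pvLoopA (rows : List String) : List Int → Int
  | [] => -1
  | i :: rest =>
    if PySem.List.pyGet? rows i = PySem.List.pyGet? rows (i + 1) then
      let p := pvWhileA rows (i - 1) (i + 2)
      if p.1 < 0 ∨ (rows.length : Int) ≤ p.2 then i else pvLoopA rows rest
    else pvLoopA rows rest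

def find_center_h (rows : List String) : Int :=
  pvLoopA rows (PySem.List.pyRange 0 ((rows.length : Int) - 1) 1)

-- ===== PORT B =====
-- 'if rows[i] != rows[i+1]: continue' then
-- 'left = rows[:i+1][::-1]; right = rows[i+1:]; m = min(len,len); left[:m] == right[:m]'
def pvLoopB (rows : List String) : List Int → Int
  | [] => -1
  | i :: rest =>
    if PySem.List.pyGet? rows i ≠ PySem.List.pyGet? rows (i + 1) then pvLoopB rows rest
    else
      let left := (PySem.List.slice rows none (some (i + 1))).reverse
      let right := PySem.List.slice rows (some (i + 1)) none
      let m := min (left.length : Int) (right.length : Int)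
      if PySem.List.slice left none (some m) = PySem.List.slice right none (some m) then i
      else pvLoopB rows rest

def find_center_h_alt (rows : List String) : Int :=
  pvLoopB rows (PySem.List.pyRange 0 ((rows.length : Int) - 1) 1)

-- ===== PRECONDITION & SPEC =====
def Spec_find_center_h (rows : List String) (out : Int) : Prop := out = find_center_h_alt rows
instance (rows : List String) (out : Int) : Decidable (Spec_find_center_h rows out) := by unfold Spec_find_center_h; infer_instance

-- ===== CLAIM (what is proved, stated in full; the proofs are below) =====
def Claim_equal_find_center_h : Prop := ∀ (rows : List String), Dom_find_center_h rows → Spec_find_center_h rows (find_center_h rows)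

-- ===== LEMMAS AND PROOFS =====

-- the while loop reaches a boundary iff every in-range mirrored pair matches
lemma pvWhileA_iff (rows : List String) (a b : Int) :
    ((pvWhileA rows a b).1 < 0 ∨ (rows.length : Int) ≤ (pvWhileA rows a b).2)
    ↔ (∀ k : Nat, 0 ≤ a - k → b + k < (rows.length : Int) →
        PySem.List.pyGet? rows (a - k) = PySem.List.pyGet? rows (b + k)) := by
  induction a, b using pvWhileA.induct rows with
  | case1 a b h ih =>
    rw [pvWhileA, dif_pos h, ih]
    constructor
    · intro hr k hk1 hk2
      match k with
      | 0 => simpa using h.2.2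
      | (j+1) =>
        have e1 : a - ((j+1 : Nat) : Int) = a - 1 - (j : Int) := by push_cast; ring
        have e2 : b + ((j+1 : Nat) : Int) = b + 1 + (j : Int) := by push_cast; ring
        rw [e1, e2]
        exact hr j (by omega) (by omega)
    · intro hr k hk1 hk2
      have e1 : a - 1 - (k : Int) = a - ((k+1 : Nat) : Int) := by push_cast; ring
      have e2 : b + 1 + (k : Int) = b + ((k+1 : Nat) : Int) := by push_cast; ring
      rw [e1, e2]
      exact hr (k+1) (by omega) (by omega)
  | case2 a b h =>
    rw [pvWhileA, dif_neg h]
    constructor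
    · intro hb k hk1 hk2
      exfalso
      rcases hb with hb | hb <;> simp at hb <;> omega
    · intro hr
      by_cases h0 : 0 ≤ a
      · by_cases h1 : b < (rows.length : Int)
        · exact absurd ⟨h0, h1, by simpa using hr 0 (by omega) (by omega)⟩ h
        · right; simpa using by omega
      · left; simpa using by omega

-- common characterisation P of "mirror at i reaches a boundary", Nat-indexed
def pvP (rows : List String) (iN mN : Nat) : Prop :=
  ∀ k : Nat, k < mN → rows[iN - k]? = rows[iN + 1 + k]?

lemma condA_iff_P (rows : List String) (i : Int) (h0 : 0 ≤ i)
    (h1 : i < (rows.length : Int) - 1) :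
    ((PySem.List.pyGet? rows i = PySem.List.pyGet? rows (i + 1)) ∧
      ((pvWhileA rows (i - 1) (i + 2)).1 < 0 ∨
        (rows.length : Int) ≤ (pvWhileA rows (i - 1) (i + 2)).2))
    ↔ pvP rows i.toNat (min (i.toNat + 1) (rows.length - 1 - i.toNat)) := by
  obtain ⟨iN, rfl⟩ : ∃ iN : Nat, i = (iN : Int) := ⟨i.toNat, (Int.toNat_of_nonneg h0).symm⟩
  simp only [Int.toNat_natCast]

  have hn : iN + 1 < rows.length := by omega
  rw [pvWhileA_iff]
  constructor
  · rintro ⟨he, hw⟩ k hk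
    match k with
    | 0 =>
      rw [show ((iN : Int) + 1) = ((iN + 1 : Nat) : Int) by push_cast; ring,
        PySem.List.pyGet?_natCast, PySem.List.pyGet?_natCast] at he
      simpa using he
    | (j+1) =>
      have := hw j (by omega) (by omega)
      rw [show (iN : Int) - 1 - (j : Int) = ((iN - (j+1) : Nat) : Int) by omega,
        show (iN : Int) + 2 + (j : Int) = ((iN + 1 + (j+1) : Nat) : Int) by push_cast; ring,
        PySem.List.pyGet?_natCast, PySem.List.pyGet?_natCast] at this
      exact this
  · intro hp
    have hm0 : 0 < min (iN + 1) (rows.length - 1 - iN) := by omega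
    constructor
    · rw [show ((iN : Int) + 1) = ((iN + 1 : Nat) : Int) by push_cast; ring,
        PySem.List.pyGet?_natCast, PySem.List.pyGet?_natCast]
      simpa using hp 0 hm0
    · intro k hk1 hk2
      rw [show (iN : Int) - 1 - (k : Int) = ((iN - (k+1) : Nat) : Int) by omega,
        show (iN : Int) + 2 + (k : Int) = ((iN + 1 + (k+1) : Nat) : Int) by push_cast; ring,
        PySem.List.pyGet?_natCast, PySem.List.pyGet?_natCast]
      exact hp (k+1) (by omega)

-- B's slice-overlap equality is the same characterisation P
lemma condB_iff_P (rows : List String) (i : Int) (h0 : 0 ≤ i)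
    (h1 : i < (rows.length : Int) - 1) :
    (PySem.List.slice ((PySem.List.slice rows none (some (i + 1))).reverse) none
        (some (min (((PySem.List.slice rows none (some (i + 1))).reverse).length : Int)
          ((PySem.List.slice rows (some (i + 1)) none).length : Int)))
      = PySem.List.slice (PySem.List.slice rows (some (i + 1)) none) none
        (some (min (((PySem.List.slice rows none (some (i + 1))).reverse).length : Int)
          ((PySem.List.slice rows (some (i + 1)) none).length : Int))))
    ↔ pvP rows i.toNat (min (i.toNat + 1) (rows.length - 1 - i.toNat)) := by
  obtain ⟨iN, rfl⟩ : ∃ iN : Nat, i = (iN : Int) := ⟨i.toNat, (Int.toNat_of_nonneg h0).symm⟩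
  simp only [Int.toNat_natCast]

  have hn : iN + 1 < rows.length := by omega
  rw [show ((iN : Int) + 1) = ((iN + 1 : Nat) : Int) by push_cast; ring,
    PySem.List.slice_to_natCast, PySem.List.slice_from_natCast]
  have hlen1 : (rows.take (iN + 1)).reverse.length = iN + 1 := by
    simp [List.length_take]; omega
  have hlen2 : (rows.drop (iN + 1)).length = rows.length - (iN + 1) := by simp
  set mN : Nat := min (iN + 1) (rows.length - 1 - iN) with hm
  have hmin : min (((rows.take (iN + 1)).reverse.length : Int))
      (((rows.drop (iN + 1)).length : Int)) = (mN : Int) := by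
    rw [hlen1, hlen2]; omega
  rw [hmin, PySem.List.slice_to_natCast, PySem.List.slice_to_natCast]

  have hlt : (List.take (iN + 1) rows).length = iN + 1 := by rw [List.length_take]; omega
  have keyL : ∀ k : Nat, k < mN → ((rows.take (iN + 1)).reverse.take mN)[k]? = rows[iN - k]? := by
    intro k hk
    rw [List.getElem?_take, if_pos hk, List.getElem?_reverse (by rw [hlt]; omega), hlt,
      List.getElem?_take, if_pos (by omega), show iN + 1 - 1 - k = iN - k from by omega]
  have keyR : ∀ k : Nat, ((rows.drop (iN + 1)).take mN)[k]? = if k < mN then rows[iN + 1 + k]? else none := by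
    intro k
    rw [List.getElem?_take, List.getElem?_drop]
  constructor
  · intro he k hk
    have := congrArg (fun l : List String => l[k]?) he
    simp only at this
    rw [keyL k hk, keyR, if_pos hk] at this
    exact this
  · intro hp
    apply List.ext_getElem?
    intro k
    by_cases hk : k < mN
    · rw [keyL k hk, keyR, if_pos hk]
      exact hp k hk
    · rw [List.getElem?_take, if_neg hk, List.getElem?_take, if_neg hk]

lemma loops_eq (rows : List String) (is : List Int)
    (hmem : ∀ i ∈ is, 0 ≤ i ∧ i < (rows.length : Int) - 1) :
    pvLoopA rows is = pvLoopB rows is := by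
  induction is with
  | nil => rfl
  | cons i rest ih =>
    obtain ⟨h0, h1⟩ := hmem i (List.mem_cons_self ..)
    have ih' := ih (fun j hj => hmem j (List.mem_cons_of_mem _ hj))
    have hiff := (condA_iff_P rows i h0 h1).trans (condB_iff_P rows i h0 h1).symm
    simp only [pvLoopA, pvLoopB]
    by_cases he : PySem.List.pyGet? rows i = PySem.List.pyGet? rows (i + 1)
    · rw [if_pos he, if_neg (not_not_intro he)]
      by_cases hB : (PySem.List.slice ((PySem.List.slice rows none (some (i + 1))).reverse) none
          (some (min (((PySem.List.slice rows none (some (i + 1))).reverse).length : Int)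
            ((PySem.List.slice rows (some (i + 1)) none).length : Int)))
        = PySem.List.slice (PySem.List.slice rows (some (i + 1)) none) none
          (some (min (((PySem.List.slice rows none (some (i + 1))).reverse).length : Int)
            ((PySem.List.slice rows (some (i + 1)) none).length : Int))))
      · obtain ⟨_, hb⟩ := hiff.mpr hB
        rw [if_pos hb, if_pos hB]
      · rw [if_neg (fun hb => hB (hiff.mp ⟨he, hb⟩)), if_neg hB]
        exact ih'
    · rw [if_neg he, if_pos he]
      exact ih'

-- ===== VERDICT (by name: the statement is the Claim_ definition above) =====
theorem find_center_h_spec : Claim_equal_find_center_h := by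
  intro rows _
  show find_center_h rows = find_center_h_alt rows
  unfold find_center_h find_center_h_alt
  exact loops_eq rows _ (fun i hi => by
    have := (PySem.List.mem_pyRange_one).mp hi
    exact ⟨this.1, this.2⟩)
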